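-- pv_equiv track=rewrite | github.com/pypi-data/pypi-mirror-374 | packages/MF-Algebra/mf_algebra-0.5.2.tar.gz/mf_algebra-0.5.2/src/MF_Algebra/utils.py | add_spaces_around_brackets
-- ===== SOURCE A (Python) =====
-- def add_spaces_around_brackets(input_string): #GPT
-- 	result = []
-- 	i = 0
-- 	length = len(input_string)
--
-- 	while i < length:
-- 		if input_string[i] == '{' or input_string[i] == '}':
-- 			if i > 0 and input_string[i - 1] != ' ':
-- 				result.append(' ')
-- 			result.append(input_string[i])
-- 			if i < length - 1 and input_string[i + 1] != ' ':
-- 				result.append(' ')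
-- 		else:
-- 			result.append(input_string[i])
-- 		i += 1
--
-- 	# Join the list into a single string and remove any extra spaces
-- 	spaced_string = ''.join(result).split()
-- 	return ' '.join(spaced_string)
-- ===== SOURCE B (Python) =====
-- def add_spaces_around_brackets(input_string):
--     spaced = input_string.replace('{', ' { ').replace('}', ' } ')
--     return ' '.join(spaced.split())
-- ===== Notes on version B (the rewrite author's own statement) =====
-- stated objective: simpler
-- what changed: Replaces the index-driven character scan with lookbehind/lookahead space-insertion branches by two str.replace passes that pad every brace unconditionally, letting split()/join() collapse the whitespace.
import Mathlib
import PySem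

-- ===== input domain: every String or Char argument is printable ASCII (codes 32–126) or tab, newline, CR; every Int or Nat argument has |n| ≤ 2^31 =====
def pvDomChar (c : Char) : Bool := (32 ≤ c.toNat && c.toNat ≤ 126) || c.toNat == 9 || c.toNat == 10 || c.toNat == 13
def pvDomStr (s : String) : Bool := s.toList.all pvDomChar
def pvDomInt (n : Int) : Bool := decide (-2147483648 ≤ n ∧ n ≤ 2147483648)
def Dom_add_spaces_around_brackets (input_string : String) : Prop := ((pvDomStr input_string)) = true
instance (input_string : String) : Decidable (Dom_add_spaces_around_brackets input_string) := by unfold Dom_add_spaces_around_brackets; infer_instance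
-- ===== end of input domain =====

-- B replaces A's index-driven scan (with lookbehind/lookahead space insertion) by two
-- str.replace passes that pad every brace, letting split()/join() collapse the whitespace;
-- objective: simpler. Equivalence is total (proved on the whole printable domain).

-- ===== PORT A =====
-- loop body of A's while loop (result is the accumulator, i the index)
def aBody (s : List Char) (length : Int) (result : List Char) (i : Int) : List Char :=
  if PySem.List.pyGetD s i ' ' = '{' ∨ PySem.List.pyGetD s i ' ' = '}' then
    let r1 := if 0 < i ∧ PySem.List.pyGetD s (i - 1) ' ' ≠ ' ' then result ++ [' '] else result
    let r2 := r1 ++ [PySem.List.pyGetD s i ' ']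
    if i < length - 1 ∧ PySem.List.pyGetD s (i + 1) ' ' ≠ ' ' then r2 ++ [' '] else r2
  else result ++ [PySem.List.pyGetD s i ' ']

def add_spaces_around_brackets (input_string : String) : String :=
  let s := input_string.toList
  let length : Int := s.length
  let result : List Char := (PySem.List.pyRange 0 length 1).foldl (aBody s length) []
  -- ''.join(result) over a list of single characters = String.ofList result
  let spaced_string := PySem.Str.split₀ (String.ofList result)
  PySem.Str.join " " spaced_string

-- ===== PORT B =====
def add_spaces_around_brackets_alt (input_string : String) : String :=
  let spaced := PySem.Str.replace (PySem.Str.replace input_string "{" " { ") "}" " } "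
  PySem.Str.join " " (PySem.Str.split₀ spaced)

-- ===== PRECONDITION & SPEC =====
def Spec_add_spaces_around_brackets (input_string : String) (out : String) : Prop := out = add_spaces_around_brackets_alt input_string
instance (input_string : String) (out : String) : Decidable (Spec_add_spaces_around_brackets input_string out) := by unfold Spec_add_spaces_around_brackets; infer_instance

-- ===== CLAIM (what is proved, stated in full; the proofs are below) =====
def Claim_equal_add_spaces_around_brackets : Prop := ∀ (input_string : String), Dom_add_spaces_around_brackets input_string → Spec_add_spaces_around_brackets input_string (add_spaces_around_brackets input_string)

-- ===== LEMMAS AND PROOFS =====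

-- per-character expansion realised by B's two replaces
def eB (c : Char) : List Char :=
  if c = '{' then [' ', '{', ' '] else if c = '}' then [' ', '}', ' '] else [c]

-- structural reformulation of A's loop: prev is the previous character (none at the start)
def pvPrevOk : Option Char → Bool
  | none => false
  | some p => p != ' '

def pvTrail : List Char → Bool
  | [] => false
  | h :: _ => h != ' '

def achA : Option Char → List Char → List Char
  | _, [] => []
  | prev, c :: rest =>
    if c = '{' ∨ c = '}' then
      (if pvPrevOk prev then [' '] else []) ++
        c :: ((if pvTrail rest then [' '] else []) ++ achA (some c) rest)
    else c :: achA (some c) rest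

lemma go_nil (cur : List Char) (acc : List (List Char)) :
    PySem.Chars.split₀.go [] cur acc =
      if cur.isEmpty then acc.reverse else (cur.reverse :: acc).reverse := by
  simp [PySem.Chars.split₀.go]

lemma go_cons (c : Char) (rest cur : List Char) (acc : List (List Char)) :
    PySem.Chars.split₀.go (c :: rest) cur acc =
      if PySem.Chars.isspace c then
        (if cur.isEmpty then PySem.Chars.split₀.go rest [] acc
         else PySem.Chars.split₀.go rest [] (cur.reverse :: acc))
      else PySem.Chars.split₀.go rest (c :: cur) acc := by
  simp [PySem.Chars.split₀.go]

-- single-character str.replace is a flatMap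
lemma replace_go_single (b : Char) (new : List Char) :
    ∀ (l : List Char) (fuel : Nat) (acc : List Char), l.length ≤ fuel →
      PySem.Chars.replace.go [b] new fuel l acc
        = acc.reverse ++ l.flatMap (fun c => if c = b then new else [c]) := by
  intro l
  induction l with
  | nil =>
      intro fuel acc _
      cases fuel <;> simp [PySem.Chars.replace.go]
  | cons c t ih =>
      intro fuel acc hf
      cases fuel with
      | zero => simp at hf
      | succ f =>
        have hlen : t.length ≤ f := by simpa using hf
        by_cases hc : c = b
        · subst hc
          have h1 : PySem.Chars.replace.go [c] new (f + 1) (c :: t) acc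
              = PySem.Chars.replace.go [c] new f t (new.reverse ++ acc) := by
            simp [PySem.Chars.replace.go, List.isPrefixOf]
          rw [h1, ih f (new.reverse ++ acc) hlen]
          simp
        · have h2 : PySem.Chars.replace.go [b] new (f + 1) (c :: t) acc
              = PySem.Chars.replace.go [b] new f t (c :: acc) := by
            simp [PySem.Chars.replace.go, List.isPrefixOf, Ne.symm hc]
          rw [h2, ih f (c :: acc) hlen]
          simp [hc]

lemma replace_single (b : Char) (new l : List Char) :
    PySem.Chars.replace l [b] new = l.flatMap (fun c => if c = b then new else [c]) := by
  simp only [PySem.Chars.replace, List.isEmpty_cons, Bool.false_eq_true, if_neg]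
  exact replace_go_single b new l l.length [] le_rfl

-- B's two replaces compose to the per-character expansion eB
lemma expand_eq (l : List Char) :
    PySem.Chars.replace (PySem.Chars.replace l ['{'] [' ', '{', ' ']) ['}'] [' ', '}', ' ']
      = l.flatMap eB := by
  rw [replace_single, replace_single, List.flatMap_assoc]
  refine List.flatMap_congr (fun c _ => ?_)
  by_cases h1 : c = '{'
  · subst h1; simp [eB]
  · by_cases h2 : c = '}' <;> simp [eB, h1, h2]

lemma isspace_brace (c : Char) (h : c = '{' ∨ c = '}') : PySem.Chars.isspace c = false := by
  rcases h with h | h <;> subst h <;> decide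

-- core simulation: A's sparsely spaced output and B's fully padded output split identically
lemma go_sim (n : Nat) : ∀ (l : List Char), l.length ≤ n →
    ∀ (prev : Option Char) (cur : List Char) (acc : List (List Char)),
      ((prev = none ∨ ∃ p, prev = some p ∧ PySem.Chars.isspace p = true) → cur = []) →
      PySem.Chars.split₀.go (achA prev l) cur acc
        = PySem.Chars.split₀.go (l.flatMap eB) cur acc := by
  have hspT : PySem.Chars.isspace ' ' = true := by decide
  induction n with
  | zero =>
      intro l hl prev cur acc _
      have : l = [] := List.length_eq_zero_iff.mp (Nat.le_zero.mp hl)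
      subst this; rfl
  | succ n ih =>
      intro l hl prev cur acc hinv
      match l with
      | [] => rfl
      | c :: rest =>
        by_cases hb : c = '{' ∨ c = '}'
        · -- brace character
          have hcsp : PySem.Chars.isspace c = false := isspace_brace c hb
          have heBc : eB c = [' ', c, ' '] := by
            rcases hb with h | h <;> subst h <;> rfl
          have hAeq : achA prev (c :: rest)
              = (if pvPrevOk prev then [' '] else []) ++
                  c :: ((if pvTrail rest then [' '] else []) ++ achA (some c) rest) := by
            rw [achA, if_pos hb]
          have hEeq : (c :: rest).flatMap eB = ' ' :: c :: ' ' :: rest.flatMap eB := by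
            rw [List.flatMap_cons, heBc]; rfl
          -- after the (possibly omitted) leading space both sides share cur = [] and some acc₁
          have step1 : ∃ acc₁,
              PySem.Chars.split₀.go (achA prev (c :: rest)) cur acc
                = PySem.Chars.split₀.go
                    (c :: ((if pvTrail rest then [' '] else []) ++ achA (some c) rest)) [] acc₁ ∧
              PySem.Chars.split₀.go ((c :: rest).flatMap eB) cur acc
                = PySem.Chars.split₀.go (c :: ' ' :: rest.flatMap eB) [] acc₁ := by
            by_cases hp : pvPrevOk prev = true
            · refine ⟨if cur.isEmpty then acc else cur.reverse :: acc, ?_, ?_⟩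
              · rw [hAeq, if_pos hp, List.singleton_append, go_cons, hspT]
                by_cases hce : cur.isEmpty <;> simp [hce]
              · rw [hEeq, go_cons, hspT]
                by_cases hce : cur.isEmpty <;> simp [hce]
            · have hcur : cur = [] := by
                apply hinv
                cases prev with
                | none => exact Or.inl rfl
                | some p =>
                    right; refine ⟨p, rfl, ?_⟩
                    have : p = ' ' := by simpa [pvPrevOk] using hp
                    subst this; decide
              subst hcur
              refine ⟨acc, ?_, ?_⟩
              · rw [hAeq, if_neg hp, List.nil_append]
              · rw [hEeq, go_cons, hspT]; simp
          obtain ⟨acc₁, hA, hB⟩ := step1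
          rw [hA, hB, go_cons, go_cons, hcsp]
          simp only [Bool.false_eq_true, if_false]
          -- both sides now carry cur = [c]; trailing-space analysis
          match rest with
          | [] =>
              rw [show pvTrail [] = false from rfl]
              simp only [Bool.false_eq_true, if_false, List.nil_append, List.flatMap_nil]
              rw [show achA (some c) [] = [] from rfl, go_nil, go_cons, hspT]
              simp [go_nil]
          | h :: rest' =>
              have hlr : rest'.length ≤ n := by
                have := hl; simp at this; omega
              have hlr1 : (h :: rest').length ≤ n := by
                have := hl; simp at this ⊢; omega
              by_cases hh : h = ' '
              · -- A omits the trailing space; the following ' ' flushes [c] on both sides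
                subst hh
                rw [show pvTrail (' ' :: rest') = false from rfl]
                simp only [Bool.false_eq_true, if_false, List.nil_append]
                rw [show achA (some c) (' ' :: rest') = ' ' :: achA (some ' ') rest' from by
                    rw [achA, if_neg (by decide)],
                  go_cons, hspT, go_cons, hspT,
                  show List.flatMap eB (' ' :: rest') = ' ' :: rest'.flatMap eB from by
                    rw [List.flatMap_cons]; rfl,
                  go_cons, hspT]
                simp only [List.isEmpty_cons, Bool.false_eq_true, if_false,
                  List.isEmpty_nil, if_true, List.reverse_singleton]
                exact ih rest' hlr (some ' ') [] ([c] :: acc₁) (fun _ => rfl)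
              · -- A keeps the trailing space; both sides flush [c] then continue with rest
                rw [show pvTrail (h :: rest') = true from by simp [pvTrail, hh]]
                simp only [if_true, List.singleton_append]
                rw [go_cons, hspT, go_cons, hspT]
                simp only [List.isEmpty_cons, Bool.false_eq_true, if_false,
                  List.reverse_singleton]
                refine ih (h :: rest') hlr1 (some c) [] ([c] :: acc₁) (fun _ => rfl)
        · -- ordinary character: both sides process c identically
          have heBc : eB c = [c] := by
            have h1 : ¬ c = '{' := fun h => hb (Or.inl h)
            have h2 : ¬ c = '}' := fun h => hb (Or.inr h)
            simp [eB, h1, h2]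
          have hlr : rest.length ≤ n := by simpa using Nat.le_of_succ_le_succ hl
          rw [achA, if_neg hb, List.flatMap_cons, heBc, List.singleton_append,
            go_cons, go_cons]
          by_cases hsp : PySem.Chars.isspace c = true
          · rw [hsp]
            by_cases hce : cur.isEmpty
            · simp only [hce, if_true]
              exact ih rest hlr (some c) [] acc (fun _ => rfl)
            · simp only [hce, Bool.false_eq_true, if_false]
              exact ih rest hlr (some c) [] (cur.reverse :: acc) (fun _ => rfl)
          · rw [Bool.not_eq_true] at hsp
            rw [hsp]
            simp only [Bool.false_eq_true, if_false]
            refine ih rest hlr (some c) (c :: cur) acc ?_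
            rintro (h' | ⟨p, hp, hsp'⟩)
            · exact absurd h' (by simp)
            · rw [Option.some_inj] at hp; subst hp; rw [hsp] at hsp'; simp at hsp'

-- A's index fold equals the structural achA
lemma bridge (s : List Char) : ∀ (m k : Nat) (acc : List Char), s.length - k ≤ m →
    (PySem.List.pyRange (k : Int) (s.length : Int) 1).foldl (aBody s (s.length : Int)) acc
      = acc ++ achA (if k = 0 then none else some (s.getD (k - 1) ' ')) (s.drop k) := by
  intro m
  induction m with
  | zero =>
      intro k acc hm
      have hk : s.length ≤ k := by omega
      have h1 : PySem.List.pyRange (k : Int) (s.length : Int) 1 = [] := by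
        simp [PySem.List.pyRange]; omega
      have h2 : s.drop k = [] := List.drop_eq_nil_of_le hk
      simp [h1, h2, achA]
  | succ m ih =>
      intro k acc hm
      by_cases hk : k < s.length
      · have hkk : (k : Int) < (s.length : Int) := by exact_mod_cast hk
        rw [PySem.List.pyRange_one_cons hkk, List.foldl_cons]
        have hstep : ((k : Int) + 1) = ((k + 1 : Nat) : Int) := by push_cast; ring
        rw [hstep, ih (k + 1) _ (by omega)]
        have hdrop : s.drop k = s[k] :: s.drop (k + 1) := List.drop_eq_getElem_cons hk
        have hgd : s.getD k ' ' = s[k] := List.getD_eq_getElem s ' ' hk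
        have hprev : (0 < (k : Int) ∧ PySem.List.pyGetD s ((k : Int) - 1) ' ' ≠ ' ')
            ↔ pvPrevOk (if k = 0 then none else some (s.getD (k - 1) ' ')) = true := by
          cases k with
          | zero => simp [pvPrevOk]
          | succ j =>
              have hc : ((j + 1 : Nat) : Int) - 1 = ((j : Nat) : Int) := by push_cast; ring
              rw [hc]
              have hpos : (0 : Int) < ((j + 1 : Nat) : Int) := by positivity
              simp [pvPrevOk, hpos]
        have hnext : ((k : Int) < (s.length : Int) - 1 ∧ PySem.List.pyGetD s ((k : Int) + 1) ' ' ≠ ' ')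
            ↔ pvTrail (s.drop (k + 1)) = true := by
          by_cases hk1 : k + 1 < s.length
          · have hdrop1 : s.drop (k + 1) = s[k + 1] :: s.drop (k + 2) := List.drop_eq_getElem_cons hk1
            have hc : ((k : Nat) : Int) + 1 = ((k + 1 : Nat) : Int) := by push_cast; ring
            have hlt : ((k : Nat) : Int) < (s.length : Int) - 1 := by
              have : (k + 1 : Int) < (s.length : Int) := by exact_mod_cast hk1
              omega
            have hget1 : PySem.List.pyGetD s ((k : Int) + 1) ' ' = s[k + 1] := by
              rw [hc, PySem.List.pyGetD_natCast, List.getD_eq_getElem s ' ' hk1]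
            rw [hdrop1, hget1]
            simp [pvTrail, hlt]
          · have hdrop1 : s.drop (k + 1) = [] := List.drop_eq_nil_of_le (by omega)
            have hge : ¬ ((k : Nat) : Int) < (s.length : Int) - 1 := by
              have : (s.length : Int) ≤ (k + 1 : Int) := by exact_mod_cast Nat.le_of_not_lt hk1
              omega
            rw [hdrop1]
            simp [pvTrail, hge]
        have hbody : aBody s (s.length : Int) acc (k : Int)
            = acc ++ (if s[k] = '{' ∨ s[k] = '}' then
                (if pvPrevOk (if k = 0 then none else some (s.getD (k - 1) ' ')) then [' '] else []) ++
                  s[k] :: (if pvTrail (s.drop (k + 1)) then [' '] else [])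
              else [s[k]]) := by
          unfold aBody
          simp only [PySem.List.pyGetD_natCast, hgd]
          by_cases hbr : s[k] = '{' ∨ s[k] = '}'
          · rw [if_pos hbr, if_pos hbr]
            simp only [hprev, hnext]
            split_ifs <;> simp [List.append_assoc]
          · rw [if_neg hbr, if_neg hbr]
        rw [hbody, hdrop]
        have hk1ne : ¬ (k + 1 = 0) := by omega
        rw [achA]
        by_cases hbr : s[k] = '{' ∨ s[k] = '}'
        · rw [if_pos hbr, if_pos hbr]
          simp [hk1ne, hgd, List.append_assoc, List.getElem?_eq_getElem hk]
        · rw [if_neg hbr, if_neg hbr]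
          simp [hk1ne, hgd, List.append_assoc, List.getElem?_eq_getElem hk]
      · have h1 : PySem.List.pyRange (k : Int) (s.length : Int) 1 = [] := by
          have : s.length ≤ k := Nat.le_of_not_lt hk
          simp [PySem.List.pyRange]; omega
        have h2 : s.drop k = [] := List.drop_eq_nil_of_le (Nat.le_of_not_lt hk)
        simp [h1, h2, achA]

-- ===== VERDICT (by name: the statement is the Claim_ definition above) =====
theorem add_spaces_around_brackets_spec : Claim_equal_add_spaces_around_brackets := by
  intro input_string _hdom
  unfold Spec_add_spaces_around_brackets
  simp only [add_spaces_around_brackets, add_spaces_around_brackets_alt]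
  have hfold : (PySem.List.pyRange 0 (input_string.toList.length : Int) 1).foldl
      (aBody input_string.toList (input_string.toList.length : Int)) []
      = achA none input_string.toList := by
    have := bridge input_string.toList input_string.toList.length 0 [] (by omega)
    simpa using this
  rw [hfold]
  have hrepl : (PySem.Str.replace (PySem.Str.replace input_string "{" " { ") "}" " } ").toList
      = input_string.toList.flatMap eB := by
    rw [PySem.Str.toList_replace, PySem.Str.toList_replace]
    rw [show ("{" : String).toList = ['{'] from rfl,
        show (" { " : String).toList = [' ', '{', ' '] from rfl,
        show ("}" : String).toList = ['}'] from rfl,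
        show (" } " : String).toList = [' ', '}', ' '] from rfl]
    exact expand_eq input_string.toList
  have hsplit : PySem.Chars.split₀ (achA none input_string.toList)
      = PySem.Chars.split₀ (input_string.toList.flatMap eB) := by
    unfold PySem.Chars.split₀
    exact go_sim input_string.toList.length input_string.toList le_rfl none [] [] (fun _ => rfl)
  simp only [PySem.Str.split₀, String.toList_ofList, hrepl, hsplit]
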